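-- pv_equiv track=rewrite | github.com/MrAgrawal1301/Github_Project_aiml | task4_all.py | get_risk_score_branches
-- ===== SOURCE A (Python) =====
-- def get_risk_score_branches(stale_time):
--     risk_score = {
--         "Low Risk": 3,
--         "Medium Risk": 5,
--         "High Risk": 8,
--         "Critical Risk": 10,
--     }
--     level_of_risk = None
--     for a,b in risk_score.items():
--         if stale_time<b:
--             level_of_risk = f"{a} --> The Stale branch is {stale_time} days old"
--             break
--         else:
--             level_of_risk = f"Critical Risk --> The Stale branch is {stale_time} days old"
--     return level_of_risk
-- ===== SOURCE B (Python) =====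
-- def get_risk_score_branches(stale_time):
--     if stale_time < 3:
--         label = "Low Risk"
--     elif stale_time < 5:
--         label = "Medium Risk"
--     elif stale_time < 8:
--         label = "High Risk"
--     else:
--         label = "Critical Risk"
--     return f"{label} --> The Stale branch is {stale_time} days old"
-- ===== Notes on version B (the rewrite author's own statement) =====
-- stated objective: simpler
-- what changed: Replaces the dict built each call and traversed with a break/else loop by a direct if/elif threshold chain that picks the label and formats the message once.
import Mathlib
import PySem

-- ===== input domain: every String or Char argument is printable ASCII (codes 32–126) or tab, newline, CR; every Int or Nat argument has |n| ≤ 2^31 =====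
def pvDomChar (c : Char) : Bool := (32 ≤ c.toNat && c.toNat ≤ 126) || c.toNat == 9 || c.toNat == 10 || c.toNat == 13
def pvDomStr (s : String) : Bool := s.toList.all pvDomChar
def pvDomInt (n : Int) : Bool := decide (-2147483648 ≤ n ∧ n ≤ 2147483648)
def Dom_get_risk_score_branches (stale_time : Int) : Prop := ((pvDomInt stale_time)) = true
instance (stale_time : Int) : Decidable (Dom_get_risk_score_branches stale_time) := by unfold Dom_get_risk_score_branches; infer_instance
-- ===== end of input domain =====

-- B replaces A's per-call dict plus break/else loop with a direct if/elif threshold chain (simpler).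


-- ===== PORT A =====
-- the dict risk_score as an association list in insertion order
def pvRiskScore : List (String × Int) :=
  [("Low Risk", 3), ("Medium Risk", 5), ("High Risk", 8), ("Critical Risk", 10)]

-- the for-loop with break over risk_score.items(); level_of_risk as Option String (None initially)
def pvRiskLoop (stale_time : Int) : List (String × Int) → Option String → Option String
  | [], acc => acc
  | (a, b) :: rest, _acc =>
    if stale_time < b then
      some (a ++ " --> The Stale branch is " ++ PySem.Int.toStr stale_time ++ " days old")
    else
      pvRiskLoop stale_time rest
        (some ("Critical Risk --> The Stale branch is " ++ PySem.Int.toStr stale_time ++ " days old"))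

def get_risk_score_branches (stale_time : Int) : String :=
  -- Python returns level_of_risk, always a str here (the dict is non-empty); none is unreachable
  (pvRiskLoop stale_time pvRiskScore none).getD ""

-- ===== PORT B =====
def get_risk_score_branches_alt (stale_time : Int) : String :=
  let label : String :=
    if stale_time < 3 then "Low Risk"
    else if stale_time < 5 then "Medium Risk"
    else if stale_time < 8 then "High Risk"
    else "Critical Risk"
  label ++ " --> The Stale branch is " ++ PySem.Int.toStr stale_time ++ " days old"

-- ===== PRECONDITION & SPEC =====
def Spec_get_risk_score_branches (stale_time : Int) (out : String) : Prop := out = get_risk_score_branches_alt stale_time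
instance (stale_time : Int) (out : String) : Decidable (Spec_get_risk_score_branches stale_time out) := by unfold Spec_get_risk_score_branches; infer_instance

-- ===== CLAIM (what is proved, stated in full; the proofs are below) =====
def Claim_equal_get_risk_score_branches : Prop := ∀ (stale_time : Int), Dom_get_risk_score_branches stale_time → Spec_get_risk_score_branches stale_time (get_risk_score_branches stale_time)

-- ===== LEMMAS AND PROOFS =====

-- ===== VERDICT (by name: the statement is the Claim_ definition above) =====
theorem get_risk_score_branches_spec : Claim_equal_get_risk_score_branches := by
  intro t _
  unfold Spec_get_risk_score_branches get_risk_score_branches get_risk_score_branches_alt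
  simp only [pvRiskScore, pvRiskLoop]
  split_ifs with h1 h2 h3 h4 <;> simp_all
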